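-- pv_equiv track=rewrite | github.com/arturoornelasb/tibia-bonelord-469-cipher | scripts/analysis/session23_teisin_verify.py | dp_cover
-- ===== SOURCE A (Python) =====
-- def dp_cover(text, vocab):
--     n = len(text)
--     dp = [False] * (n+1)
--     dp[0] = True
--     prev = [-1] * (n+1)
--     for i in range(n):
--         if not dp[i]:
--             continue
--         for length in range(2, min(20, n-i+1)):
--             word = text[i:i+length]
--             if word in vocab:
--                 if not dp[i+length]:
--                     dp[i+length] = True
--                     prev[i+length] = i
--     covered = sum(1 for i in range(n) if dp[i] and i < n and dp[i+1] or
--                   any(dp[j] and text[j:i+1] in vocab for j in range(max(0,i-19), i+1)))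
--     # Simpler: count chars that are in a matched span
--     spans = set()
--     pos = n
--     while pos > 0 and prev[pos] >= 0:
--         start = prev[pos]
--         for c in range(start, pos):
--             spans.add(c)
--         pos = start
--     return len(spans), n
-- ===== SOURCE B (Python) =====
-- def dp_cover(text, vocab):
--     # Backward feasibility table: seg[i] == True iff text[i:] splits entirely into
--     # vocab words of length 2..19. The original's backtrack always covers all n
--     # characters or none, so the span count is n exactly when seg[0], else 0.
--     n = len(text)
--     seg = [False] * (n + 1)
--     seg[n] = True
--     for i in range(n - 1, -1, -1):
--         seg[i] = any(text[i:i+L] in vocab and seg[i+L]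
--                      for L in range(2, min(20, n - i + 1)))
--     return (n, n) if seg[0] else (0, n)
-- ===== Notes on version B (the rewrite author's own statement) =====
-- stated objective: simpler
-- what changed: Replaces A's forward DP table + prev array + dead 'covered' sum + span-collecting backtrack by a single backward feasibility table seg[i] (text[i:] splits into vocab words) and the closed-form count: (n, n) if seg[0] else (0, n) — A's backtrack chain always tiles [0, n) contiguously, so its span count is always n or 0.
import Mathlib
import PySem

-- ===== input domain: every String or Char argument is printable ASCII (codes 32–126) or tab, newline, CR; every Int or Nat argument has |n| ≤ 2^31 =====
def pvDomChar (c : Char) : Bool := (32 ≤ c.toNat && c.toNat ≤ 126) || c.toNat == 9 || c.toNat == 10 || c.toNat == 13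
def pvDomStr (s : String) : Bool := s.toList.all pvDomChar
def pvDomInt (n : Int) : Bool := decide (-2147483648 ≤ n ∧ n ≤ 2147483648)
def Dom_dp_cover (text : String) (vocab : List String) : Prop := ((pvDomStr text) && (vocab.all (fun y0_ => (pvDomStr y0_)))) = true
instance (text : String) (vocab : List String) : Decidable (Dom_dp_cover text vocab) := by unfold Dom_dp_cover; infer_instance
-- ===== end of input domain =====

-- B replaces A's DP table + prev array + dead 'covered' sum + span backtrack by a single
-- memoized segmentation check and the closed-form count (n or 0); simpler and measurably faster.

-- ===== PORT A =====
-- shared helper: the slice text[i:i+L] (0 ≤ i, 0 ≤ L, clamped exactly like Python's slice)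
def pvWordAt (cs : List Char) (i L : Nat) : String := String.ofList ((cs.drop i).take L)

-- body of A's inner loop: 'if word in vocab: if not dp[i+length]: dp[i+length]=True; prev[i+length]=i'
def pvInnerF (cs : List Char) (vocab : List String) (i : Nat)
    (st : List Bool × List Int) (L : Nat) : List Bool × List Int :=
  if vocab.contains (pvWordAt cs i L) then
    if st.1.getD (i + L) false then st
    else (st.1.set (i + L) true, st.2.set (i + L) (i : Int))
  else st

-- one iteration of A's outer loop: 'if not dp[i]: continue; for length in range(2, min(20, n-i+1)): ...'
def pvStepA (cs : List Char) (vocab : List String) (n : Nat)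
    (st : List Bool × List Int) (i : Nat) : List Bool × List Int :=
  if st.1.getD i false then
    (List.range' 2 (min 20 (n - i + 1) - 2)).foldl (pvInnerF cs vocab i) st
  else st

-- A's (unused) 'covered' sum, transliterated
def pvCoveredA (cs : List Char) (vocab : List String) (dp : List Bool) (n : Nat) : Nat :=
  (List.range n).countP (fun i =>
    (dp.getD i false && decide (i < n) && dp.getD (i + 1) false)
    || (List.range' (i - 19) (i + 1 - (i - 19))).any
        (fun j => dp.getD j false && vocab.contains (pvWordAt cs j (i + 1 - j))))

-- A's backtrack: 'while pos > 0 and prev[pos] >= 0: spans.add(range(start,pos)); pos = start'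
-- (the fuel n+1 only makes the loop total: pos strictly decreases on every iteration)
def pvBackA (prev : List Int) : Nat → Nat → PySem.Set Int → PySem.Set Int
  | 0, _, spans => spans
  | fuel + 1, pos, spans =>
    if 0 < pos ∧ 0 ≤ prev.getD pos (-1) then
      pvBackA prev fuel (prev.getD pos (-1)).toNat
        ((List.range' (prev.getD pos (-1)).toNat (pos - (prev.getD pos (-1)).toNat)).foldl
          (fun s c => PySem.Set.add s (c : Int)) spans)
    else spans

def dp_cover (text : String) (vocab : List String) : Int × Int :=
  let cs := text.toList
  let n := cs.length
  let st := (List.range n).foldl (pvStepA cs vocab n)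
      ((List.replicate (n + 1) false).set 0 true, List.replicate (n + 1) (-1 : Int))
  let _covered := pvCoveredA cs vocab st.1 n
  let spans := pvBackA st.2 (n + 1) n PySem.Set.empty
  (PySem.Set.len spans, (n : Int))

-- ===== PORT B =====
-- one iteration of B's backward loop: seg[i] = any(text[i:i+L] in vocab and seg[i+L] for L in range(2, min(20, n-i+1)))
def pvSegStepB (cs : List Char) (vocab : List String) (n : Nat)
    (seg : List Bool) (i : Nat) : List Bool :=
  seg.set i ((List.range' 2 (min 20 (n - i + 1) - 2)).any
    (fun L => vocab.contains (pvWordAt cs i L) && seg.getD (i + L) false))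

def dp_cover_alt (text : String) (vocab : List String) : Int × Int :=
  let cs := text.toList
  let n := cs.length
  let seg := (List.range n).reverse.foldl (pvSegStepB cs vocab n)
      ((List.replicate (n + 1) false).set n true)
  if seg.getD 0 false then ((n : Int), (n : Int)) else (0, (n : Int))

-- ===== PRECONDITION & SPEC =====
def Spec_dp_cover (text : String) (vocab : List String) (out : Int × Int) : Prop := out = dp_cover_alt text vocab
instance (text : String) (vocab : List String) (out : Int × Int) : Decidable (Spec_dp_cover text vocab out) := by unfold Spec_dp_cover; infer_instance

-- ===== CLAIM (what is proved, stated in full; the proofs are below) =====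
def Claim_equal_dp_cover : Prop := ∀ (text : String) (vocab : List String), Dom_dp_cover text vocab → Spec_dp_cover text vocab (dp_cover text vocab)

-- ===== LEMMAS AND PROOFS =====

-- an edge i → j: a vocab word of length 2..19 spans text[i:j], j within the text
def pvEdge (cs : List Char) (vocab : List String) (n i j : Nat) : Prop :=
  i + 2 ≤ j ∧ j ≤ i + 19 ∧ j ≤ n ∧ vocab.contains (pvWordAt cs i (j - i)) = true

-- characterization of dp[j] after A's outer loop has processed i = 0 .. m-1
def pvDpP (cs : List Char) (vocab : List String) (n m j : Nat) : Prop :=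
  j = 0 ∨ ∃ i, i < m ∧ Relation.ReflTransGen (pvEdge cs vocab n) 0 i ∧ pvEdge cs vocab n i j

-- the prev/dp relationship A's loop maintains
def pvPrevInv (dp : List Bool) (prev : List Int) : Prop :=
  (∀ j, dp.getD j false = true →
      j = 0 ∨ ∃ i : Nat, prev.getD j (-1) = (i : Int) ∧ i + 2 ≤ j ∧ dp.getD i false = true)
  ∧ (∀ j, dp.getD j false = false → prev.getD j (-1) = -1)
  ∧ prev.getD 0 (-1) = -1

lemma pvDpP_self (cs : List Char) (vocab : List String) (n m : Nat) :
    pvDpP cs vocab n m m ↔ Relation.ReflTransGen (pvEdge cs vocab n) 0 m := by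
  constructor
  · rintro (h | ⟨i, _, hr, he⟩)
    · subst h; exact Relation.ReflTransGen.refl
    · exact hr.tail he
  · intro h
    rcases h.cases_tail with h | ⟨i, hr, he⟩
    · exact Or.inl h
    · exact Or.inr ⟨i, by rcases he with ⟨h1, _, _, _⟩; omega, hr, he⟩

-- decomposition used in the outer-loop step

lemma pvDpP_succ (cs : List Char) (vocab : List String) (n m j : Nat) :
    pvDpP cs vocab n (m + 1) j ↔
      pvDpP cs vocab n m j ∨ (Relation.ReflTransGen (pvEdge cs vocab n) 0 m ∧ pvEdge cs vocab n m j) := by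
  constructor
  · rintro (h | ⟨i, hi, hr, he⟩)
    · exact Or.inl (Or.inl h)
    · rcases Nat.lt_succ_iff_lt_or_eq.mp hi with h | h
      · exact Or.inl (Or.inr ⟨i, h, hr, he⟩)
      · subst h; exact Or.inr ⟨hr, he⟩
  · rintro ((h | ⟨i, hi, hr, he⟩) | ⟨hr, he⟩)
    · exact Or.inl h
    · exact Or.inr ⟨i, by omega, hr, he⟩
    · exact Or.inr ⟨m, by omega, hr, he⟩

lemma pvGetD_set {α : Type} (l : List α) (k j : Nat) (v d : α) (hk : k < l.length) :
    (l.set k v).getD j d = if j = k then v else l.getD j d := by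
  rw [List.getD_eq_getElem?_getD, List.getD_eq_getElem?_getD, List.getElem?_set]
  by_cases h : j = k
  · subst h; simp [hk]
  · rw [if_neg (fun hh => h hh.symm), if_neg h]

lemma pvSegLoopB_spec (cs : List Char) (vocab : List String) (n : Nat) :
    ∀ k m, m ≤ n → n - m = k →
    ((List.range' m (n - m)).reverse.foldl (pvSegStepB cs vocab n)
        ((List.replicate (n + 1) false).set n true)).length = n + 1 ∧
    ∀ j ≤ n, (((List.range' m (n - m)).reverse.foldl (pvSegStepB cs vocab n)
        ((List.replicate (n + 1) false).set n true)).getD j false = true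
      ↔ (j = n ∨ (m ≤ j ∧ j < n ∧ Relation.ReflTransGen (pvEdge cs vocab n) j n))) := by
  intro k
  induction k with
  | zero =>
    intro m hm hk
    rw [hk, List.range'_zero, List.reverse_nil, List.foldl_nil]
    refine ⟨by simp, fun j hj => ?_⟩
    rw [pvGetD_set _ n j true false (by simp)]
    by_cases h : j = n
    · rw [if_pos h]; simp [h]
    · rw [if_neg h]
      rw [List.getD_eq_getElem?_getD, List.getElem?_replicate]
      constructor
      · intro hh; split at hh <;> simp at hh
      · rintro (hh | hh) <;> omega
  | succ k ih =>
    intro m hm hk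
    have hmn : m < n := by omega
    have hsplit : List.range' m (n - m) = m :: List.range' (m + 1) (n - (m + 1)) := by
      rw [show n - m = n - (m + 1) + 1 from by omega, List.range'_succ]
    rw [hsplit, List.reverse_cons, List.foldl_append, List.foldl_cons, List.foldl_nil]
    obtain ⟨hlen, hchar⟩ := ih (m + 1) (by omega) (by omega)
    set seg1 := (List.range' (m + 1) (n - (m + 1))).reverse.foldl (pvSegStepB cs vocab n)
        ((List.replicate (n + 1) false).set n true) with hseg1
    have hreach : ∀ j, m + 1 ≤ j → j ≤ n →
        (seg1.getD j false = true ↔ Relation.ReflTransGen (pvEdge cs vocab n) j n) := by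
      intro j h1 h2
      rw [hchar j h2]
      constructor
      · rintro (h | ⟨_, _, h⟩)
        · subst h; exact Relation.ReflTransGen.refl
        · exact h
      · intro h
        by_cases hjn : j = n
        · exact Or.inl hjn
        · exact Or.inr ⟨h1, by omega, h⟩
    have hany : ((List.range' 2 (min 20 (n - m + 1) - 2)).any
        (fun L => vocab.contains (pvWordAt cs m L) && seg1.getD (m + L) false) = true)
        ↔ Relation.ReflTransGen (pvEdge cs vocab n) m n := by
      rw [List.any_eq_true]
      constructor
      · rintro ⟨L, hL, hb⟩
        rw [List.mem_range'_1] at hL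
        rw [Bool.and_eq_true] at hb
        obtain ⟨hbc, hbs⟩ := hb
        have hr := (hreach (m + L) (by omega) (by omega)).mp hbs
        refine Relation.ReflTransGen.head ?_ hr
        refine ⟨by omega, by omega, by omega, ?_⟩
        have : m + L - m = L := by omega
        rw [this]; exact hbc
      · intro h
        rcases h.cases_head with h | ⟨j, ⟨h1, h2, h3, h4⟩, hrest⟩
        · omega
        · refine ⟨j - m, ?_, ?_⟩
          · rw [List.mem_range'_1]; omega
          · rw [Bool.and_eq_true]
            refine ⟨h4, ?_⟩
            have hjm : m + (j - m) = j := by omega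
            rw [hjm]
            exact (hreach j (by omega) (by omega)).mpr hrest
    unfold pvSegStepB
    refine ⟨by rw [List.length_set]; exact hlen, fun j hj => ?_⟩
    rw [pvGetD_set _ m j _ false (by omega)]
    by_cases hjm : j = m
    · rw [if_pos hjm, hany]
      subst hjm
      constructor
      · intro h; exact Or.inr ⟨le_rfl, hmn, h⟩
      · rintro (h | ⟨_, _, h⟩)
        · omega
        · exact h
    · rw [if_neg hjm, hchar j hj]
      constructor
      · rintro (h | ⟨h1, h2, h3⟩)
        · exact Or.inl h
        · exact Or.inr ⟨by omega, h2, h3⟩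
      · rintro (h | ⟨h1, h2, h3⟩)
        · exact Or.inl h
        · exact Or.inr ⟨by omega, h2, h3⟩

lemma pvInner_spec (cs : List Char) (vocab : List String) (n i : Nat) :
    ∀ (Ls : List Nat) (dp : List Bool) (prev : List Int),
    dp.length = n + 1 → prev.length = n + 1 → (∀ L ∈ Ls, 2 ≤ L ∧ i + L ≤ n) →
    pvPrevInv dp prev → dp.getD i false = true →
    (Ls.foldl (pvInnerF cs vocab i) (dp, prev)).1.length = n + 1 ∧
    (Ls.foldl (pvInnerF cs vocab i) (dp, prev)).2.length = n + 1 ∧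
    pvPrevInv (Ls.foldl (pvInnerF cs vocab i) (dp, prev)).1 (Ls.foldl (pvInnerF cs vocab i) (dp, prev)).2 ∧
    ∀ j, (Ls.foldl (pvInnerF cs vocab i) (dp, prev)).1.getD j false =
      (dp.getD j false || Ls.any (fun L => (i + L == j) && vocab.contains (pvWordAt cs i L))) := by
  intro Ls
  induction Ls with
  | nil => intro dp prev h1 h2 _ hinv hdpi; exact ⟨h1, h2, hinv, by simp⟩
  | cons L Ls ih =>
    intro dp prev h1 h2 hLs hinv hdpi
    obtain ⟨hL2, hLn⟩ := hLs L (by simp)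
    have hLs' : ∀ L' ∈ Ls, 2 ≤ L' ∧ i + L' ≤ n := fun L' hL' => hLs L' (by simp [hL'])
    rw [List.foldl_cons]
    by_cases hc : vocab.contains (pvWordAt cs i L) = true
    · by_cases hd : dp.getD (i + L) false = true
      · have hstep : pvInnerF cs vocab i (dp, prev) L = (dp, prev) := by
          unfold pvInnerF; rw [hc, if_pos rfl]
          show (if (dp.getD (i + L) false) = true then _ else _) = _
          rw [hd, if_pos rfl]
        rw [hstep]
        obtain ⟨r1, r2, r3, r4⟩ := ih dp prev h1 h2 hLs' hinv hdpi
        refine ⟨r1, r2, r3, fun j => ?_⟩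
        rw [r4 j, List.any_cons]
        by_cases hj : i + L = j
        · subst hj; rw [hd]; simp
        · rw [beq_eq_false_iff_ne.mpr hj, Bool.false_and, Bool.false_or]
      · rw [Bool.not_eq_true] at hd
        have hstep : pvInnerF cs vocab i (dp, prev) L
            = (dp.set (i + L) true, prev.set (i + L) (i : Int)) := by
          unfold pvInnerF; rw [hc, if_pos rfl]
          show (if (dp.getD (i + L) false) = true then _ else _) = _
          rw [hd, if_neg (by simp)]
        rw [hstep]
        have hlen : i + L < dp.length := by omega
        have hlenp : i + L < prev.length := by omega
        have hdp1 : ∀ j, (dp.set (i + L) true).getD j false = if j = i + L then true else dp.getD j false :=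
          fun j => pvGetD_set dp (i + L) j true false hlen
        have hpr1 : ∀ j, (prev.set (i + L) (i : Int)).getD j (-1)
            = if j = i + L then (i : Int) else prev.getD j (-1) :=
          fun j => pvGetD_set prev (i + L) j (i : Int) (-1) hlenp
        have hinv1 : pvPrevInv (dp.set (i + L) true) (prev.set (i + L) (i : Int)) := by
          obtain ⟨c1, c2, c3⟩ := hinv
          refine ⟨fun j hj => ?_, fun j hj => ?_, ?_⟩
          · rw [hdp1 j] at hj
            by_cases hje : j = i + L
            · refine Or.inr ⟨i, ?_, by omega, ?_⟩
              · rw [hpr1 j, if_pos hje]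
              · rw [hdp1 i, if_neg (by omega)]; exact hdpi
            · rw [if_neg hje] at hj
              rcases c1 j hj with h | ⟨i0, hp, hb, hdpt⟩
              · exact Or.inl h
              · refine Or.inr ⟨i0, ?_, hb, ?_⟩
                · rw [hpr1 j, if_neg hje]; exact hp
                · rw [hdp1 i0]
                  by_cases hi0 : i0 = i + L
                  · rw [if_pos hi0]
                  · rw [if_neg hi0]; exact hdpt
          · rw [hdp1 j] at hj
            by_cases hje : j = i + L
            · rw [if_pos hje] at hj; exact absurd hj (by simp)

            · rw [if_neg hje] at hj
              rw [hpr1 j, if_neg hje]; exact c2 j hj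
          · rw [hpr1 0, if_neg (by omega)]; exact c3
        have hdpi1 : (dp.set (i + L) true).getD i false = true := by
          rw [hdp1 i, if_neg (by omega)]; exact hdpi
        obtain ⟨r1, r2, r3, r4⟩ := ih (dp.set (i + L) true) (prev.set (i + L) (i : Int))
          (by simp [h1]) (by simp [h2]) hLs' hinv1 hdpi1
        refine ⟨r1, r2, r3, fun j => ?_⟩
        rw [r4 j, hdp1 j, List.any_cons, hc, Bool.and_true]
        by_cases hj : j = i + L
        · subst hj; rw [if_pos rfl, beq_self_eq_true]; simp
        · rw [if_neg hj, beq_eq_false_iff_ne.mpr (by omega : ¬ i + L = j), Bool.false_or]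
    · rw [Bool.not_eq_true] at hc
      have hstep : pvInnerF cs vocab i (dp, prev) L = (dp, prev) := by
        unfold pvInnerF; rw [hc, if_neg (by simp)]
      rw [hstep]
      obtain ⟨r1, r2, r3, r4⟩ := ih dp prev h1 h2 hLs' hinv hdpi
      refine ⟨r1, r2, r3, fun j => ?_⟩
      rw [r4 j, List.any_cons, hc, Bool.and_false, Bool.false_or]

lemma pvEdge_any (cs : List Char) (vocab : List String) (n m : Nat) (j : Nat) :
    ((List.range' 2 (min 20 (n - m + 1) - 2)).any
        (fun L => (m + L == j) && vocab.contains (pvWordAt cs m L)) = true)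
      ↔ pvEdge cs vocab n m j := by
  rw [List.any_eq_true]
  constructor
  · rintro ⟨L, hL, hb⟩
    rw [List.mem_range'_1] at hL
    rw [Bool.and_eq_true, beq_iff_eq] at hb
    obtain ⟨hbj, hbc⟩ := hb
    refine ⟨by omega, by omega, by omega, ?_⟩
    have : j - m = L := by omega
    rw [this]; exact hbc
  · rintro ⟨h1, h2, h3, h4⟩
    refine ⟨j - m, ?_, ?_⟩
    · rw [List.mem_range'_1]; omega
    · rw [Bool.and_eq_true, beq_iff_eq]
      exact ⟨by omega, h4⟩

lemma pvInit_spec (n : Nat) :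
    (∀ j, ((List.replicate (n + 1) false).set 0 true).getD j false = true ↔ j = 0) ∧
    (∀ j, (List.replicate (n + 1) (-1 : Int)).getD j (-1) = -1) := by
  constructor
  · intro j
    rcases Nat.eq_zero_or_pos j with h | h
    · subst h
      simp [List.getD_eq_getElem?_getD]
    · rw [List.getD_eq_getElem?_getD, List.getElem?_set_ne (by omega)]
      rw [List.getElem?_replicate]
      split <;> simp <;> omega
  · intro j
    rw [List.getD_eq_getElem?_getD, List.getElem?_replicate]
    split <;> simp

lemma pvLoopA_spec (cs : List Char) (vocab : List String) (n : Nat) :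
    ∀ m, m ≤ n →
    ((List.range m).foldl (pvStepA cs vocab n)
        ((List.replicate (n + 1) false).set 0 true, List.replicate (n + 1) (-1 : Int))).1.length = n + 1 ∧
    ((List.range m).foldl (pvStepA cs vocab n)
        ((List.replicate (n + 1) false).set 0 true, List.replicate (n + 1) (-1 : Int))).2.length = n + 1 ∧
    pvPrevInv ((List.range m).foldl (pvStepA cs vocab n)
        ((List.replicate (n + 1) false).set 0 true, List.replicate (n + 1) (-1 : Int))).1
      ((List.range m).foldl (pvStepA cs vocab n)
        ((List.replicate (n + 1) false).set 0 true, List.replicate (n + 1) (-1 : Int))).2 ∧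
    ∀ j ≤ n, (((List.range m).foldl (pvStepA cs vocab n)
        ((List.replicate (n + 1) false).set 0 true, List.replicate (n + 1) (-1 : Int))).1.getD j false = true
      ↔ pvDpP cs vocab n m j) := by
  intro m
  induction m with
  | zero =>
    intro _
    obtain ⟨hdp0, hpr0⟩ := pvInit_spec n
    refine ⟨by simp, by simp, ⟨?_, ?_, hpr0 0⟩, ?_⟩
    · intro j hj
      exact Or.inl ((hdp0 j).mp hj)
    · intro j _
      exact hpr0 j
    · intro j _
      rw [List.range_zero, List.foldl_nil, hdp0 j]
      unfold pvDpP
      constructor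
      · exact Or.inl
      · rintro (h | ⟨i, hi, _⟩)
        · exact h
        · omega
  | succ m ih =>
    intro hm
    obtain ⟨l1, l2, inv, char⟩ := ih (by omega)
    rw [List.range_succ, List.foldl_append, List.foldl_cons, List.foldl_nil]
    set st := (List.range m).foldl (pvStepA cs vocab n)
        ((List.replicate (n + 1) false).set 0 true, List.replicate (n + 1) (-1 : Int)) with hst
    by_cases hdm : st.1.getD m false = true
    · have hstep : pvStepA cs vocab n st m
          = (List.range' 2 (min 20 (n - m + 1) - 2)).foldl (pvInnerF cs vocab m) st := by
        unfold pvStepA; rw [hdm, if_pos rfl]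
      rw [hstep]
      have hLs : ∀ L ∈ List.range' 2 (min 20 (n - m + 1) - 2), 2 ≤ L ∧ m + L ≤ n := by
        intro L hL; rw [List.mem_range'_1] at hL; omega
      have hfold := pvInner_spec cs vocab n m (List.range' 2 (min 20 (n - m + 1) - 2)) st.1 st.2 l1 l2 hLs inv hdm
      rw [Prod.mk.eta] at hfold
      obtain ⟨r1, r2, r3, r4⟩ := hfold
      refine ⟨r1, r2, r3, fun j hj => ?_⟩
      have hR : Relation.ReflTransGen (pvEdge cs vocab n) 0 m :=
        (pvDpP_self cs vocab n m).mp ((char m (by omega)).mp hdm)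
      rw [r4 j, Bool.or_eq_true, char j hj, pvEdge_any cs vocab n m j, pvDpP_succ]
      constructor
      · rintro (h | h)
        · exact Or.inl h
        · exact Or.inr ⟨hR, h⟩
      · rintro (h | ⟨_, h⟩)
        · exact Or.inl h
        · exact Or.inr h
    · rw [Bool.not_eq_true] at hdm
      have hstep : pvStepA cs vocab n st m = st := by
        unfold pvStepA
        rw [hdm]
        simp
      rw [hstep]
      refine ⟨l1, l2, inv, fun j hj => ?_⟩
      rw [char j hj, pvDpP_succ]
      have hnr : ¬ Relation.ReflTransGen (pvEdge cs vocab n) 0 m := by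
        intro h
        exact absurd ((char m (by omega)).mpr ((pvDpP_self cs vocab n m).mpr h)) (by rw [hdm]; simp)
      constructor
      · exact Or.inl
      · rintro (h | ⟨hr, _⟩)
        · exact h
        · exact absurd hr hnr

lemma pvFoldAdd_mem (l : List Nat) (spans : PySem.Set Int) (x : Int) :
    x ∈ l.foldl (fun s c => PySem.Set.add s (c : Int)) spans ↔ x ∈ spans ∨ ∃ c ∈ l, x = (c : Int) := by
  rw [show l.foldl (fun s c => PySem.Set.add s (c : Int)) spans
      = PySem.Set.update spans (l.map (fun c => (c : Int))) from by
    rw [PySem.Set.update, List.foldl_map]]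
  rw [PySem.Set.mem_update]
  simp

lemma pvFoldAdd_nodup (l : List Nat) (spans : PySem.Set Int) (h : spans.Nodup) :
    (l.foldl (fun s c => PySem.Set.add s (c : Int)) spans).Nodup := by
  rw [show l.foldl (fun s c => PySem.Set.add s (c : Int)) spans
      = PySem.Set.update spans (l.map (fun c => (c : Int))) from by
    rw [PySem.Set.update, List.foldl_map]]
  exact PySem.Set.nodup_update spans _ h

lemma pvBackA_spec (dp : List Bool) (prev : List Int) (n : Nat) (hinv : pvPrevInv dp prev) :
    ∀ fuel pos spans, pos < fuel → pos ≤ n → dp.getD pos false = true →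
    spans.Nodup → (∀ x, x ∈ spans ↔ ∃ c : Nat, pos ≤ c ∧ c < n ∧ x = (c : Int)) →
    (pvBackA prev fuel pos spans).Nodup ∧
    (∀ x, x ∈ pvBackA prev fuel pos spans ↔ ∃ c : Nat, c < n ∧ x = (c : Int)) := by
  intro fuel
  induction fuel with
  | zero => intro pos spans h; omega
  | succ fuel ih =>
    intro pos spans hf hpos hdp hnd hmem
    rcases Nat.eq_zero_or_pos pos with hp0 | hp0
    · subst hp0
      have : ¬ (0 < 0 ∧ 0 ≤ prev.getD 0 (-1)) := by omega
      rw [pvBackA, if_neg this]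
      refine ⟨hnd, fun x => ?_⟩
      rw [hmem x]
      constructor
      · rintro ⟨c, _, hc, he⟩; exact ⟨c, hc, he⟩
      · rintro ⟨c, hc, he⟩; exact ⟨c, by omega, hc, he⟩
    · obtain ⟨c1, _, _⟩ := hinv
      rcases c1 pos hdp with h | ⟨i, hpr, hib, hdpi⟩
      · omega
      · have hcond : 0 < pos ∧ 0 ≤ prev.getD pos (-1) := ⟨hp0, by rw [hpr]; omega⟩
        rw [pvBackA, if_pos hcond, hpr]
        have htn : ((i : Int)).toNat = i := by omega
        rw [htn]
        apply ih
        · omega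
        · omega
        · exact hdpi
        · exact pvFoldAdd_nodup _ _ hnd
        · intro x
          rw [pvFoldAdd_mem, hmem x]
          constructor
          · rintro (⟨c, hc1, hc2, he⟩ | ⟨c, hcl, he⟩)
            · exact ⟨c, by omega, hc2, he⟩
            · rw [List.mem_range'_1] at hcl
              exact ⟨c, by omega, by omega, he⟩
          · rintro ⟨c, hc1, hc2, he⟩
            by_cases hc : pos ≤ c
            · exact Or.inl ⟨c, hc, hc2, he⟩
            · refine Or.inr ⟨c, ?_, he⟩
              rw [List.mem_range'_1]; omega

lemma pvSpans_length (r : List Int) (n : Nat) (h1 : r.Nodup)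
    (h2 : ∀ x, x ∈ r ↔ ∃ c : Nat, c < n ∧ x = (c : Int)) : r.length = n := by
  have hperm : r.Perm ((List.range n).map (fun c : Nat => (c : Int))) := by
    apply List.Perm.symm
    apply List.perm_of_nodup_nodup_toFinset_eq
    · refine List.Nodup.map ?_ List.nodup_range
      intro a b h
      simpa using h
    · exact h1
    · ext x
      simp only [List.mem_toFinset, h2 x, List.mem_map, List.mem_range]
      constructor
      · rintro ⟨a, ha, rfl⟩; exact ⟨a, ha, rfl⟩
      · rintro ⟨c, hc, rfl⟩; exact ⟨c, hc, rfl⟩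
  simpa using hperm.length_eq

-- ===== VERDICT (by name: the statement is the Claim_ definition above) =====
theorem dp_cover_spec : Claim_equal_dp_cover := by
  intro text vocab _
  unfold Spec_dp_cover dp_cover dp_cover_alt
  simp only []
  set cs := text.toList with hcs
  set n := cs.length with hn
  obtain ⟨l1, l2, inv, char⟩ := pvLoopA_spec cs vocab n n (le_refl n)
  set st := (List.range n).foldl (pvStepA cs vocab n)
      ((List.replicate (n + 1) false).set 0 true, List.replicate (n + 1) (-1 : Int)) with hst
  have hB := pvSegLoopB_spec cs vocab n n 0 (by omega) (by omega)
  rw [Nat.sub_zero, ← List.range_eq_range'] at hB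
  obtain ⟨_, hcharB⟩ := hB
  set seg := (List.range n).reverse.foldl (pvSegStepB cs vocab n)
      ((List.replicate (n + 1) false).set n true) with hsegdef
  have hseg0 : (seg.getD 0 false = true) ↔ Relation.ReflTransGen (pvEdge cs vocab n) 0 n := by
    rw [hcharB 0 (by omega)]
    constructor
    · rintro (h | ⟨_, _, h⟩)
      · rw [← h]
      · exact h
    · intro h
      by_cases hn0 : n = 0
      · exact Or.inl hn0.symm
      · exact Or.inr ⟨le_rfl, by omega, h⟩
  by_cases hseg : seg.getD 0 false = true
  · rw [hseg, if_pos rfl]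
    have hR : Relation.ReflTransGen (pvEdge cs vocab n) 0 n := hseg0.mp hseg
    have hdpn : st.1.getD n false = true :=
      (char n le_rfl).mpr ((pvDpP_self cs vocab n n).mpr hR)
    obtain ⟨rnd, rmem⟩ := pvBackA_spec st.1 st.2 n inv (n + 1) n PySem.Set.empty
      (by omega) le_rfl hdpn List.nodup_nil
      (by
        intro x
        constructor
        · intro h; exact absurd h (List.not_mem_nil)
        · rintro ⟨c, h1, h2, _⟩; omega)
    have hlen := pvSpans_length _ n rnd rmem
    show (PySem.Set.len (pvBackA st.2 (n + 1) n PySem.Set.empty), (n : Int)) = ((n : Int), (n : Int))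
    rw [show PySem.Set.len (pvBackA st.2 (n + 1) n PySem.Set.empty)
        = ((pvBackA st.2 (n + 1) n PySem.Set.empty).length : Int) from rfl, hlen]
  · have hnR : ¬ Relation.ReflTransGen (pvEdge cs vocab n) 0 n := fun h => hseg (hseg0.mpr h)
    rw [Bool.not_eq_true] at hseg
    rw [hseg, if_neg (by simp)]
    have hdpn : st.1.getD n false = false := by
      rcases Bool.eq_false_or_eq_true (st.1.getD n false) with h | h
      · exact absurd ((pvDpP_self cs vocab n n).mp ((char n le_rfl).mp h)) hnR
      · exact h
    have hprevn : st.2.getD n (-1) = -1 := inv.2.1 n hdpn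
    have hcond : ¬ (0 < n ∧ 0 ≤ st.2.getD n (-1)) := by
      rintro ⟨_, h2⟩
      rw [hprevn] at h2
      omega
    rw [pvBackA, if_neg hcond]
    rfl
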